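-- pv_equiv track=rewrite | github.com/JonatanSwDev/2021-2023-DAM | 2023 - 2 DAM/Python/03_Funciones/funciones/Cadenas.py | cadenas_largas
-- ===== SOURCE A (Python) =====
-- def cadenas_largas(lista):
--     max_cadena = []
--     longitud = 0
--     for cadena in lista:
--         if len(cadena) == longitud:
--             max_cadena.append(cadena)
--         elif len(cadena) > longitud:
--             longitud = len(cadena)
--             max_cadena = [cadena]
--     return max_cadena
-- ===== SOURCE B (Python) =====
-- def cadenas_largas(lista):
--     m = max((len(c) for c in lista), default=0)
--     return [c for c in lista if len(c) == m]
-- ===== Notes on version B (the rewrite author's own statement) =====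
-- stated objective: idiomatic
-- what changed: B replaces A's single accumulator loop (rebuilding the result list whenever a longer string appears) by a two-phase form: compute the maximum length with max(..., default=0), then filter by it with a comprehension.
import Mathlib
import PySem

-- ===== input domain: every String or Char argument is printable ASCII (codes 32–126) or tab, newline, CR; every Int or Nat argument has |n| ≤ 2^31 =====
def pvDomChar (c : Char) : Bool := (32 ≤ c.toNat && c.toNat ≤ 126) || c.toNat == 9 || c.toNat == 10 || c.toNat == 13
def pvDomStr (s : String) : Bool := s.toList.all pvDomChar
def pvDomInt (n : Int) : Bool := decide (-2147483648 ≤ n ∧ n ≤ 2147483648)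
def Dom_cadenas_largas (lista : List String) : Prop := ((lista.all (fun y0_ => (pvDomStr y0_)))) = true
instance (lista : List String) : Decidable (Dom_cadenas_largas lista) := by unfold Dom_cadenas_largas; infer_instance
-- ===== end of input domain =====

-- B computes the maximum length first (max with default 0), then filters; one honest line: same values, plainer two-phase decomposition.

-- ===== PORT A =====
def cadenas_largas (lista : List String) : List String :=
  (lista.foldl
    (fun (st : List String × Nat) cadena =>
      if cadena.length = st.2 then (st.1 ++ [cadena], st.2)
      else if cadena.length > st.2 then ([cadena], cadena.length)
      else st)
    ([], 0)).1

-- ===== PORT B =====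
def cadenas_largas_alt (lista : List String) : List String :=
  let m := lista.foldl (fun a c => max a c.length) 0
  lista.filter (fun c => c.length == m)

-- ===== PRECONDITION & SPEC =====
def Spec_cadenas_largas (lista : List String) (out : List String) : Prop := out = cadenas_largas_alt lista
instance (lista : List String) (out : List String) : Decidable (Spec_cadenas_largas lista out) := by unfold Spec_cadenas_largas; infer_instance

-- ===== CLAIM (what is proved, stated in full; the proofs are below) =====
def Claim_equal_cadenas_largas : Prop := ∀ (lista : List String), Dom_cadenas_largas lista → Spec_cadenas_largas lista (cadenas_largas lista)

-- ===== LEMMAS AND PROOFS =====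

def pvMaxLen (l : List String) : Nat := l.foldl (fun a c => max a c.length) 0

theorem pvMaxLen_ge_init : ∀ (l : List String) (a : Nat), a ≤ l.foldl (fun a c => max a c.length) a := by
  intro l
  induction l with
  | nil => intro a; simp
  | cons c t ih =>
      intro a
      calc a ≤ max a c.length := by omega
        _ ≤ t.foldl (fun a c => max a c.length) (max a c.length) := ih _

theorem pvMaxLen_mem_le : ∀ (l : List String) (a : Nat) (x : String), x ∈ l →
    x.length ≤ l.foldl (fun a c => max a c.length) a := by
  intro l
  induction l with
  | nil => intro a x hx; cases hx
  | cons c t ih =>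
      intro a x hx
      rcases List.mem_cons.mp hx with h | h
      · subst h
        calc x.length ≤ max a x.length := by omega
          _ ≤ t.foldl (fun a c => max a c.length) (max a x.length) := pvMaxLen_ge_init _ _
      · exact ih _ _ h

theorem pvMaxLen_append_one (p : List String) (c : String) :
    pvMaxLen (p ++ [c]) = max (pvMaxLen p) c.length := by
  simp [pvMaxLen, List.foldl_append]

theorem pv_loop (l : List String) : ∀ (p : List String),
    l.foldl
      (fun (st : List String × Nat) cadena =>
        if cadena.length = st.2 then (st.1 ++ [cadena], st.2)
        else if cadena.length > st.2 then ([cadena], cadena.length)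
        else st)
      (p.filter (fun c => c.length == pvMaxLen p), pvMaxLen p)
    = ((p ++ l).filter (fun c => c.length == pvMaxLen (p ++ l)), pvMaxLen (p ++ l)) := by
  induction l with
  | nil => intro p; simp
  | cons c t ih =>
      intro p
      have key :
          (if c.length = pvMaxLen p
             then (p.filter (fun x => x.length == pvMaxLen p) ++ [c], pvMaxLen p)
             else if c.length > pvMaxLen p then ([c], c.length)
             else (p.filter (fun x => x.length == pvMaxLen p), pvMaxLen p))
          = ((p ++ [c]).filter (fun x => x.length == pvMaxLen (p ++ [c])), pvMaxLen (p ++ [c])) := by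
        rcases Nat.lt_trichotomy c.length (pvMaxLen p) with hlt | heq | hgt
        · have hm : pvMaxLen (p ++ [c]) = pvMaxLen p := by
            rw [pvMaxLen_append_one]; omega
          rw [if_neg (by omega), if_neg (by omega), hm]
          simp [List.filter_append, Nat.ne_of_lt hlt]
        · have hm : pvMaxLen (p ++ [c]) = pvMaxLen p := by
            rw [pvMaxLen_append_one]; omega
          rw [if_pos heq, hm]
          simp [List.filter_append, heq]
        · have hm : pvMaxLen (p ++ [c]) = c.length := by
            rw [pvMaxLen_append_one]; omega
          rw [if_neg (by omega), if_pos hgt, hm]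
          have hfp : p.filter (fun x => x.length == c.length) = [] := by
            rw [List.filter_eq_nil_iff]
            intro x hx
            have := pvMaxLen_mem_le p 0 x hx
            simp only [beq_iff_eq]
            have : x.length ≤ pvMaxLen p := this
            omega
          simp [List.filter_append, hfp]
      calc
        (c :: t).foldl _ (p.filter (fun x => x.length == pvMaxLen p), pvMaxLen p)
            = t.foldl _ ((p ++ [c]).filter (fun x => x.length == pvMaxLen (p ++ [c])), pvMaxLen (p ++ [c])) := by
              simp only [List.foldl_cons]; rw [key]
        _ = ((p ++ [c] ++ t).filter (fun x => x.length == pvMaxLen (p ++ [c] ++ t)), pvMaxLen (p ++ [c] ++ t)) := ih (p ++ [c])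
        _ = ((p ++ c :: t).filter (fun x => x.length == pvMaxLen (p ++ c :: t)), pvMaxLen (p ++ c :: t)) := by
              simp

-- ===== VERDICT (by name: the statement is the Claim_ definition above) =====
theorem cadenas_largas_spec : Claim_equal_cadenas_largas := by
  intro lista _
  show cadenas_largas lista = cadenas_largas_alt lista
  have h := pv_loop lista []
  simp only [List.nil_append, List.filter_nil] at h
  simp [cadenas_largas, cadenas_largas_alt, pvMaxLen] at h ⊢
  rw [h]
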